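-- pv_equiv track=rewrite | github.com/strakajagr/equine-equalizer | backend/services/data_sources/hrn_scraper.py | _parse_race_type
-- ===== SOURCE A (Python) =====
-- RACE_TYPE_MAP = {
--     'allowance optional claiming':
--         'allowance_optional_claiming',
--     'starter optional claiming':
--         'allowance_optional_claiming',
--     'optional claiming':
--         'allowance_optional_claiming',
--     'maiden special weight': 'maiden',
--     'maiden claiming': 'maiden_claiming',
--     'graded stakes': 'graded_stakes',
--     'grade 1': 'graded_stakes',
--     'grade 2': 'graded_stakes',
--     'grade 3': 'graded_stakes',
--     'allowance': 'allowance',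
--     'claiming': 'claiming',
--     'maiden': 'maiden',
--     'stakes': 'stakes',
--     'listed': 'stakes',
-- }
--
-- def _parse_race_type(text: str) -> str:
--     """Normalize race type from conditions text."""
--     text_lower = text.lower()
--     # Check longest matches first
--     for keyword in sorted(
--         RACE_TYPE_MAP.keys(),
--         key=len,
--         reverse=True
--     ):
--         if keyword in text_lower:
--             return RACE_TYPE_MAP[keyword]
--     return 'allowance'  # safe default
-- ===== SOURCE B (Python) =====
-- RACE_TYPE_MAP = {
--     'allowance optional claiming':
--         'allowance_optional_claiming',
--     'starter optional claiming':
--         'allowance_optional_claiming',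
--     'optional claiming':
--         'allowance_optional_claiming',
--     'maiden special weight': 'maiden',
--     'maiden claiming': 'maiden_claiming',
--     'graded stakes': 'graded_stakes',
--     'grade 1': 'graded_stakes',
--     'grade 2': 'graded_stakes',
--     'grade 3': 'graded_stakes',
--     'allowance': 'allowance',
--     'claiming': 'claiming',
--     'maiden': 'maiden',
--     'stakes': 'stakes',
--     'listed': 'stakes',
-- }
--
-- def _parse_race_type(text: str) -> str:
--     """Normalize race type: single pass over the map, keep the longest match."""
--     text_lower = text.lower()
--     best_len = -1
--     result = 'allowance'
--     for keyword, value in RACE_TYPE_MAP.items():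
--         if len(keyword) > best_len and keyword in text_lower:
--             best_len = len(keyword)
--             result = value
--     return result
-- ===== Notes on version B (the rewrite author's own statement) =====
-- stated objective: simpler
-- what changed: Replaces the sort-keys-by-length-then-first-match scan with a single pass over RACE_TYPE_MAP.items() that tracks the longest matching keyword (strict > keeps the first of equal-length matches, matching the stable sort's tie-breaking).
import Mathlib
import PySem

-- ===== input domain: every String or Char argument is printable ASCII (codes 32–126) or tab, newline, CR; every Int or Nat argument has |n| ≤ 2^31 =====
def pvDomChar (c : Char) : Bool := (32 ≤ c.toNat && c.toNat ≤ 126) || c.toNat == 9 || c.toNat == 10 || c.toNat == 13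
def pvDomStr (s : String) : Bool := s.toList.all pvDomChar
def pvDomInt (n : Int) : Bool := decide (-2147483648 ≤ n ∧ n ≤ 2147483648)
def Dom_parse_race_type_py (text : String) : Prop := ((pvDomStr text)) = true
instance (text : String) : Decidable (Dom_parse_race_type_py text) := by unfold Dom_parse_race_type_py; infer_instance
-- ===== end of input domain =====

-- B replaces A's sort-keys-by-length-then-first-match scan by a single pass over the
-- map keeping the longest match (objective: simpler).

-- ===== PORT A =====
def RACE_TYPE_MAP : PySem.Dict String String := PySem.Dict.ofList [
  ("allowance optional claiming", "allowance_optional_claiming"),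
  ("starter optional claiming", "allowance_optional_claiming"),
  ("optional claiming", "allowance_optional_claiming"),
  ("maiden special weight", "maiden"),
  ("maiden claiming", "maiden_claiming"),
  ("graded stakes", "graded_stakes"),
  ("grade 1", "graded_stakes"),
  ("grade 2", "graded_stakes"),
  ("grade 3", "graded_stakes"),
  ("allowance", "allowance"),
  ("claiming", "claiming"),
  ("maiden", "maiden"),
  ("stakes", "stakes"),
  ("listed", "stakes")]

-- the for-loop with its early return; RACE_TYPE_MAP[keyword] cannot miss (keyword ∈ keys),
-- so getD's default is unreachable
def pvLoopA (tl : String) : List String → String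
  | [] => "allowance"
  | k :: rest => if PySem.Str.isIn k tl then (RACE_TYPE_MAP.get? k).getD "" else pvLoopA tl rest

def parse_race_type_py (text : String) : String :=
  let text_lower := PySem.Str.lower text
  pvLoopA text_lower (PySem.List.sorted RACE_TYPE_MAP.keys (fun k => PySem.Str.len k) true)

-- ===== PORT B =====
def parse_race_type_py_alt (text : String) : String :=
  let text_lower := PySem.Str.lower text
  (RACE_TYPE_MAP.items.foldl
    (fun (st : Int × String) kv =>
      if PySem.Str.len kv.1 > st.1 && PySem.Str.isIn kv.1 text_lower then (PySem.Str.len kv.1, kv.2) else st)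
    (-1, "allowance")).2

-- ===== PRECONDITION & SPEC =====
def Spec_parse_race_type_py (text : String) (out : String) : Prop := out = parse_race_type_py_alt text
instance (text : String) (out : String) : Decidable (Spec_parse_race_type_py text out) := by unfold Spec_parse_race_type_py; infer_instance

-- ===== CLAIM (what is proved, stated in full; the proofs are below) =====
def Claim_equal_parse_race_type_py : Prop := ∀ (text : String), Dom_parse_race_type_py text → Spec_parse_race_type_py text (parse_race_type_py text)

-- ===== LEMMAS AND PROOFS =====

-- key length of an items pair
def pvKeyLen (p : String × String) : Int := PySem.Str.len p.1

-- first pair whose key is contained (A's early-return scan, abstracted over the pair list)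
def pvFirst (c : String → Bool) : List (String × String) → Option (String × String)
  | [] => none
  | p :: t => if c p.1 then some p else pvFirst c t

-- B's fold step
def pvStep (c : String → Bool) (st : Int × String) (kv : String × String) : Int × String :=
  if PySem.Str.len kv.1 > st.1 && c kv.1 then (PySem.Str.len kv.1, kv.2) else st

theorem pvFirst_mem {c : String → Bool} {S : List (String × String)} {p : String × String}
    (h : pvFirst c S = some p) : p ∈ S := by
  induction S with
  | nil => simp [pvFirst] at h
  | cons q t ih =>
    by_cases hq : c q.1
    · simp [pvFirst, hq] at h; simp [h]
    · simp [pvFirst, hq] at h; exact List.mem_cons_of_mem _ (ih h)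

-- inserting kv into a length-descending sorted list: the first match is the old first
-- match unless kv matches and is strictly longer
theorem pvFirst_insertBy (c : String → Bool) (kv : String × String)
    (S : List (String × String)) (hp : S.Pairwise (fun a b => pvKeyLen b ≤ pvKeyLen a)) :
    pvFirst c (PySem.List.insertBy (fun a b => decide (pvKeyLen b < pvKeyLen a)) kv S) =
      if c kv.1 then
        (pvFirst c S).elim (some kv) (fun p => if pvKeyLen p < pvKeyLen kv then some kv else some p)
      else pvFirst c S := by
  induction S with
  | nil =>
    by_cases hc : c kv.1 <;> simp [PySem.List.insertBy, pvFirst, hc]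
  | cons y ys ih =>
    rcases List.pairwise_cons.mp hp with ⟨hy, hys⟩
    show pvFirst c (if decide (pvKeyLen y < pvKeyLen kv) = true then kv :: y :: ys
        else y :: PySem.List.insertBy _ kv ys) = _
    by_cases hcmp : pvKeyLen y < pvKeyLen kv
    · rw [if_pos (by simp [hcmp])]
      by_cases hc : c kv.1
      · rcases hfy : pvFirst c (y :: ys) with _ | p
        · simp [pvFirst, hc]
        · have hmem := pvFirst_mem hfy
          have hle : pvKeyLen p ≤ pvKeyLen y := by
            rcases List.mem_cons.mp hmem with h | h
            · simp [h]
            · exact hy p h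
          simp [pvFirst, hc, show pvKeyLen p < pvKeyLen kv by omega]
      · simp [pvFirst, hc]
    · rw [if_neg (by simp [hcmp])]
      by_cases hcy : c y.1
      · by_cases hc : c kv.1
        · simp [pvFirst, hcy, hc, hcmp]
        · simp [pvFirst, hcy, hc]
      · show (if c y.1 = true then some y
            else pvFirst c (PySem.List.insertBy (fun a b => decide (pvKeyLen b < pvKeyLen a)) kv ys)) = _
        rw [if_neg (by simp [hcy]), ih hys]
        by_cases hc : c kv.1 <;> simp [pvFirst, hcy, hc]

-- B's left fold computes exactly (length, value) of the first match of the
-- stable length-descending sort (A's scan order), or the (-1, default) start state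
theorem pv_inv (c : String → Bool) (L : List (String × String)) :
    L.foldl (pvStep c) (-1, "allowance") =
      (pvFirst c (PySem.List.sorted L pvKeyLen true)).elim
        ((-1 : Int), "allowance") (fun p => (pvKeyLen p, p.2)) := by
  induction L using List.reverseRecOn with
  | nil => rfl
  | append_singleton L kv ih =>
    have hs : PySem.List.sorted (L ++ [kv]) pvKeyLen true =
        PySem.List.insertBy (fun a b => decide (pvKeyLen b < pvKeyLen a)) kv
          (PySem.List.sorted L pvKeyLen true) := by
      rw [PySem.List.sorted_rev_eq_foldl_insertBy, PySem.List.sorted_rev_eq_foldl_insertBy,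
        List.foldl_append, List.foldl_cons, List.foldl_nil]
    rw [List.foldl_append, List.foldl_cons, List.foldl_nil, ih, hs,
      pvFirst_insertBy c kv _ (PySem.List.sorted_pairwise_rev L pvKeyLen)]
    have hlen : (0 : Int) ≤ PySem.Str.len kv.1 := by
      rw [PySem.Str.len_eq]; exact Int.natCast_nonneg _
    by_cases hc : c kv.1
    · rcases hf : pvFirst c (PySem.List.sorted L pvKeyLen true) with _ | p
      · have h1 : (-1 : Int) < (kv.1.length : Int) := by
          have := PySem.Str.len_eq kv.1; omega
        simp [pvStep, hc, pvKeyLen, PySem.Str.len_eq, h1]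
      · have e1 := PySem.Str.len_eq p.1
        have e2 := PySem.Str.len_eq kv.1
        have f1 : p.1.toList.length = p.1.length := by simp
        have f2 : kv.1.toList.length = kv.1.length := by simp
        by_cases hlt : pvKeyLen p < pvKeyLen kv
        · have h1 : p.1.length < kv.1.length := by unfold pvKeyLen at hlt; omega
          simp [pvStep, hc, pvKeyLen, PySem.Str.len_eq, h1]
        · have h1 : ¬ p.1.length < kv.1.length := by unfold pvKeyLen at hlt; omega
          simp [pvStep, hc, pvKeyLen, PySem.Str.len_eq, h1]
    · rcases hf : pvFirst c (PySem.List.sorted L pvKeyLen true) with _ | p <;>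
        simp [pvStep, hc]

-- A's early-return scan over the keys of a pair list, with the dict lookups resolved
theorem pv_chain (tl : String) (S : List (String × String))
    (h : ∀ p ∈ S, (RACE_TYPE_MAP.get? p.1).getD "" = p.2) :
    pvLoopA tl (S.map Prod.fst) =
      (pvFirst (fun k => PySem.Str.isIn k tl) S).elim "allowance" (fun p => p.2) := by
  induction S with
  | nil => rfl
  | cons p t ih =>
    by_cases hc : PySem.Str.isIn p.1 tl
    · simp only [List.map_cons, pvLoopA, pvFirst, hc, if_true]
      simp [h p (List.mem_cons_self)]
    · simp only [List.map_cons, pvLoopA, pvFirst, hc, Bool.false_eq_true, if_false]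
      exact ih (fun q hq => h q (List.mem_cons_of_mem _ hq))

-- the stable length-descending sort of the (literal) items, and its key list
theorem pv_sorted_items :
    PySem.List.sorted RACE_TYPE_MAP.items pvKeyLen true =
      [("allowance optional claiming", "allowance_optional_claiming"),
       ("starter optional claiming", "allowance_optional_claiming"),
       ("maiden special weight", "maiden"),
       ("optional claiming", "allowance_optional_claiming"),
       ("maiden claiming", "maiden_claiming"),
       ("graded stakes", "graded_stakes"),
       ("allowance", "allowance"),
       ("claiming", "claiming"),
       ("grade 1", "graded_stakes"),
       ("grade 2", "graded_stakes"),
       ("grade 3", "graded_stakes"),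
       ("maiden", "maiden"),
       ("stakes", "stakes"),
       ("listed", "stakes")] := by decide

theorem pv_sorted_keys :
    PySem.List.sorted RACE_TYPE_MAP.keys (fun k => PySem.Str.len k) true =
      (PySem.List.sorted RACE_TYPE_MAP.items pvKeyLen true).map Prod.fst := by decide

theorem pv_core (tl : String) :
    pvLoopA tl (PySem.List.sorted RACE_TYPE_MAP.keys (fun k => PySem.Str.len k) true) =
      (RACE_TYPE_MAP.items.foldl
        (fun (st : Int × String) kv =>
          if PySem.Str.len kv.1 > st.1 && PySem.Str.isIn kv.1 tl then (PySem.Str.len kv.1, kv.2) else st)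
        (-1, "allowance")).2 := by
  have hB : (RACE_TYPE_MAP.items.foldl
        (fun (st : Int × String) kv =>
          if PySem.Str.len kv.1 > st.1 && PySem.Str.isIn kv.1 tl then (PySem.Str.len kv.1, kv.2) else st)
        (-1, "allowance")) =
      RACE_TYPE_MAP.items.foldl (pvStep (fun k => PySem.Str.isIn k tl)) (-1, "allowance") := rfl
  rw [hB, pv_inv, pv_sorted_keys,
    pv_chain tl (PySem.List.sorted RACE_TYPE_MAP.items pvKeyLen true)
      (by rw [pv_sorted_items]; decide)]
  rcases pvFirst (fun k => PySem.Str.isIn k tl) (PySem.List.sorted RACE_TYPE_MAP.items pvKeyLen true)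
    with _ | p <;> rfl

-- ===== VERDICT (by name: the statement is the Claim_ definition above) =====
theorem parse_race_type_py_spec : Claim_equal_parse_race_type_py := by
  intro text _
  unfold Spec_parse_race_type_py parse_race_type_py parse_race_type_py_alt
  exact pv_core (PySem.Str.lower text)
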